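-- pv_equiv track=rewrite | github.com/h-dmt/Python_Fundamentals | 18_list_advanced/take_skip_rope.py | take_skip
-- ===== SOURCE A (Python) =====
-- def take_skip(take_item, skip_item, lst):
--     index = 0
--     out_lst = []
--     for i in range(len(take_item)):
--         take_m = take_item[i]
--         if take_m > 0:
--             out_lst.append(''.join(lst[index:index + take_m]))
--             index += take_m
--         skip_n = skip_item[i]
--         index += skip_n
--
--     return out_lst
-- ===== SOURCE B (Python) =====
-- def take_skip(take_item, skip_item, lst):
--     # Pass 1: offset table — starts[i] is the read position before step i.
--     starts = [0]
--     for t, s in zip(take_item, skip_item):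
--         starts.append(starts[-1] + (t if t > 0 else 0) + s)
--     # Pass 2: one slice per positive take count.
--     return [''.join(lst[st:st + t]) for t, st in zip(take_item, starts) if t > 0]
-- ===== Notes on version B (the rewrite author's own statement) =====
-- stated objective: alternative
-- what changed: Replaces A's single index-mutating append loop by a two-pass decomposition: a first pass builds a table of start offsets (running sum of positive takes plus skips), then a filtered comprehension maps each positive take to its slice-join.
import Mathlib
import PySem

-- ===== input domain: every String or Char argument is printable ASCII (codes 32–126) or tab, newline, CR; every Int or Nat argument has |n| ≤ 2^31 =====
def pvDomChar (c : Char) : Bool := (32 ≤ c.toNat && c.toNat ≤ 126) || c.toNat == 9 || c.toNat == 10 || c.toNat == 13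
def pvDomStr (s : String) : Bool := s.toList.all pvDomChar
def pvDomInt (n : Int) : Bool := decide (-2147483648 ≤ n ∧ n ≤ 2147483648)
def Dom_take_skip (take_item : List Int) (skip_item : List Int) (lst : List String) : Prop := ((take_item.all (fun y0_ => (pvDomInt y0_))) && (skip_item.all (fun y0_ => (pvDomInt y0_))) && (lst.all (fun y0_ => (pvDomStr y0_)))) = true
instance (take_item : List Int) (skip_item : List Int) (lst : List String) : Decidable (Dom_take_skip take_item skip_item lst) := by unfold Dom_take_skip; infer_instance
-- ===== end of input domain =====

-- B replaces A's single index-mutating loop by an offset-table pass plus a filtered mapping pass (same cost; alternative decomposition).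


-- ===== PORT A =====
-- Literal port of A: for i in range(len(take_item)) with state (index, out_lst);
-- take_item[i]/skip_item[i] as pyGetD (in range under Pre_take_skip).
def take_skip (take_item : List Int) (skip_item : List Int) (lst : List String) : List String :=
  ((PySem.List.pyRange 0 (take_item.length : Int) 1).foldl
    (fun (st : Int × List String) (i : Int) =>
      let take_m := PySem.List.pyGetD take_item i 0
      let st' :=
        if take_m > 0 then
          (st.1 + take_m, st.2 ++ [PySem.Str.join "" (PySem.List.slice lst (some st.1) (some (st.1 + take_m)))])
        else st
      let skip_n := PySem.List.pyGetD skip_item i 0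
      (st'.1 + skip_n, st'.2))
    ((0 : Int), ([] : List String))).2

-- ===== PORT B =====
-- Literal port of B: pass 1 builds the start-offset table via zip, pass 2 is the filtered comprehension.
def take_skip_alt (take_item : List Int) (skip_item : List Int) (lst : List String) : List String :=
  let starts : List Int :=
    ((take_item.zip skip_item).foldl
      (fun (st : Int × List Int) (p : Int × Int) =>
        let nxt := st.1 + (if p.1 > 0 then p.1 else 0) + p.2
        (nxt, st.2 ++ [nxt]))
      ((0 : Int), ([0] : List Int))).2
  ((take_item.zip starts).filter (fun p => decide (p.1 > 0))).map
    (fun p => PySem.Str.join "" (PySem.List.slice lst (some p.2) (some (p.2 + p.1))))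

-- ===== PRECONDITION & SPEC =====
-- A indexes skip_item[i] for every i < len(take_item); it raises IndexError when skip_item is shorter.
def Pre_take_skip (take_item : List Int) (skip_item : List Int) (lst : List String) : Prop :=
  take_item.length ≤ skip_item.length
instance (take_item : List Int) (skip_item : List Int) (lst : List String) : Decidable (Pre_take_skip take_item skip_item lst) := by unfold Pre_take_skip; infer_instance
def pvWitness_take_skip : List Int × List Int × List String := ([2, -1, 1], [1, 2, 0], ["a", "b", "c", "d", "e"])

def Spec_take_skip (take_item : List Int) (skip_item : List Int) (lst : List String) (out : List String) : Prop := out = take_skip_alt take_item skip_item lst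
instance (take_item : List Int) (skip_item : List Int) (lst : List String) (out : List String) : Decidable (Spec_take_skip take_item skip_item lst out) := by unfold Spec_take_skip; infer_instance

-- ===== CLAIM (what is proved, stated in full; the proofs are below) =====
def Claim_equal_take_skip : Prop := ∀ (take_item : List Int) (skip_item : List Int) (lst : List String), Dom_take_skip take_item skip_item lst → Pre_take_skip take_item skip_item lst → Spec_take_skip take_item skip_item lst (take_skip take_item skip_item lst)

-- ===== LEMMAS AND PROOFS =====

-- The common result, by structural recursion over the (take, skip) pairs with the running start.
def pvBuild (lst : List String) : List (Int × Int) → Int → List String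
  | [], _ => []
  | (t, s) :: ps, c =>
      if t > 0 then
        PySem.Str.join "" (PySem.List.slice lst (some c) (some (c + t))) :: pvBuild lst ps (c + t + s)
      else pvBuild lst ps (c + s)

def pvScan : List (Int × Int) → Int → List Int
  | [], _ => []
  | p :: ps, c => (c + (if p.1 > 0 then p.1 else 0) + p.2) :: pvScan ps (c + (if p.1 > 0 then p.1 else 0) + p.2)

theorem pvA_fold_eq (lst : List String) :
    ∀ (ps : List (Int × Int)) (c : Int) (out : List String),
    (ps.foldl
      (fun (st : Int × List String) (p : Int × Int) =>
        let st' :=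
          if p.1 > 0 then
            (st.1 + p.1, st.2 ++ [PySem.Str.join "" (PySem.List.slice lst (some st.1) (some (st.1 + p.1)))])
          else st
        (st'.1 + p.2, st'.2)) (c, out)).2 = out ++ pvBuild lst ps c := by
  intro ps
  induction ps with
  | nil => intro c out; simp [pvBuild]
  | cons p ps ih =>
      intro c out
      obtain ⟨t, s⟩ := p
      by_cases ht : t > 0
      · simp only [List.foldl_cons, ht, pvBuild, ih]
        simp
      · simp only [List.foldl_cons, ht, pvBuild, ih]
        simp

theorem pvB_starts_eq :
    ∀ (ps : List (Int × Int)) (c : Int) (acc : List Int),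
    (ps.foldl
      (fun (st : Int × List Int) (p : Int × Int) =>
        let nxt := st.1 + (if p.1 > 0 then p.1 else 0) + p.2
        (nxt, st.2 ++ [nxt])) (c, acc)).2 = acc ++ pvScan ps c := by
  intro ps
  induction ps with
  | nil => intro c acc; simp [pvScan]
  | cons p ps ih => intro c acc; simp [pvScan, ih]

theorem pvB_pass2_eq (lst : List String) :
    ∀ (t s : List Int) (c : Int), t.length ≤ s.length →
    ((t.zip (c :: pvScan (t.zip s) c)).filter (fun p => decide (p.1 > 0))).map
      (fun p => PySem.Str.join "" (PySem.List.slice lst (some p.2) (some (p.2 + p.1))))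
      = pvBuild lst (t.zip s) c := by
  intro t
  induction t with
  | nil => intro s c _; simp [pvBuild]
  | cons a t ih =>
      intro s c h
      cases s with
      | nil => simp at h
      | cons b s =>
          simp only [List.length_cons, Nat.add_le_add_iff_right] at h
          by_cases ha : a > 0
          · simp [pvScan, pvBuild, ha, ih s _ h]
          · simp [pvScan, pvBuild, ha, ih s _ h]

theorem pvZip_getD (t s : List Int) (i : Int) (h : t.length ≤ s.length)
    (h0 : 0 ≤ i) (h1 : i < (t.length : Int)) :
    PySem.List.pyGetD t i 0 = (PySem.List.pyGetD (t.zip s) i (0, 0)).1 ∧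
    PySem.List.pyGetD s i 0 = (PySem.List.pyGetD (t.zip s) i (0, 0)).2 := by
  have hlen : (t.zip s).length = t.length := by simp [List.length_zip]; omega
  have hi : i.toNat < t.length := by omega
  rw [PySem.List.pyGetD_eq_getElem t 0 h0 (by omega),
      PySem.List.pyGetD_eq_getElem s 0 h0 (by omega),
      PySem.List.pyGetD_eq_getElem (t.zip s) (0, 0) h0 (by rw [hlen]; push_cast; omega)]
  simp [List.getElem_zip]

-- ===== VERDICT (by name: the statement is the Claim_ definition above) =====
theorem take_skip_spec : Claim_equal_take_skip := by
  intro take_item skip_item lst _ hpre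
  unfold Spec_take_skip take_skip take_skip_alt Pre_take_skip at *
  rw [pvB_starts_eq]
  simp only [List.singleton_append]
  rw [pvB_pass2_eq lst take_item skip_item 0 hpre]
  have hlen : ((take_item.zip skip_item).length : Int) = (take_item.length : Int) := by
    simp [List.length_zip]; omega
  rw [← hlen]
  rw [PySem.List.foldl_congr_mem _ _ (fun (st : Int × List String) (i : Int) =>
      (fun (st : Int × List String) (p : Int × Int) =>
        let st' :=
          if p.1 > 0 then
            (st.1 + p.1, st.2 ++ [PySem.Str.join "" (PySem.List.slice lst (some st.1) (some (st.1 + p.1)))])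
          else st
        (st'.1 + p.2, st'.2)) st (PySem.List.pyGetD (take_item.zip skip_item) i (0, 0)))
      _ (by
        intro acc x hx
        rw [PySem.List.mem_pyRange_one] at hx
        obtain ⟨h1, h2⟩ := pvZip_getD take_item skip_item x hpre hx.1 (by
          have := hx.2; omega)
        simp only [← h1, ← h2])]
  have h2 := PySem.List.foldl_pyRange_zero_pyGetD' (take_item.zip skip_item) ((0 : Int), (0 : Int))
      (fun (st : Int × List String) (p : Int × Int) =>
        let st' :=
          if p.1 > 0 then
            (st.1 + p.1, st.2 ++ [PySem.Str.join "" (PySem.List.slice lst (some st.1) (some (st.1 + p.1)))])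
          else st
        (st'.1 + p.2, st'.2)) ((0 : Int), ([] : List String))
  rw [h2]
  rw [pvA_fold_eq]
  simp
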